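-- pv_equiv track=rewrite | github.com/hypernetix/hyperspot | testing/e2e/modules/types_registry/test_registration_debug_logging.py | get_log_lines_after
-- ===== SOURCE A (Python) =====
-- def get_log_lines_after(marker: str, content: str) -> list[str]:
--     """Get log lines that appear after a specific marker in the log content."""
--     lines = content.split('\n')
--     found_marker = False
--     result = []
--     for line in lines:
--         if marker in line:
--             found_marker = True
--         if found_marker:
--             result.append(line)
--     return result
-- ===== SOURCE B (Python) =====
-- def get_log_lines_after(marker: str, content: str) -> list[str]:
--     """Get log lines that appear after a specific marker in the log content."""
--     lines = content.split('\n')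
--     for i, line in enumerate(lines):
--         if marker in line:
--             return lines[i:]
--     return []
-- ===== Notes on version B (the rewrite author's own statement) =====
-- stated objective: simpler
-- what changed: B finds the index of the first line containing the marker and returns the contiguous tail slice lines[i:] with an early return, instead of scanning all lines with a found_marker flag and appending matching lines one by one.
import Mathlib
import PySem

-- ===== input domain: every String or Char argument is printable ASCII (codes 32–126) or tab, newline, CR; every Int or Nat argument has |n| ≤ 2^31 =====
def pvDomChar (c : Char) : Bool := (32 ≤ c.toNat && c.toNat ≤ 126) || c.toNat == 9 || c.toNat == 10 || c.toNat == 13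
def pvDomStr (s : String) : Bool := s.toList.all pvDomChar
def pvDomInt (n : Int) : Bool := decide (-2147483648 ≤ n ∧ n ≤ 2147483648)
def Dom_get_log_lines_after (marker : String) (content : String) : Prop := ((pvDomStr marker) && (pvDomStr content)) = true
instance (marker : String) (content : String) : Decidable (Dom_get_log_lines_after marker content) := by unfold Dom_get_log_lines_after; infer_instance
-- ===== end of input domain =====

-- B replaces A's found_marker flag and line-by-line accumulation with find-first-index
-- and a contiguous tail slice (simpler decomposition; same cost).

-- ===== PORT A =====
-- A's loop body: update found_marker, then conditionally append the line
def stepA (p : String → Bool) (st : Bool × List String) (line : String) : Bool × List String :=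
  let found := if p line then true else st.1
  if found then (found, st.2 ++ [line]) else (found, st.2)

-- flag-and-accumulate fold over the lines, transliterating A's loop state (found_marker, result)
def get_log_lines_after (marker : String) (content : String) : List String :=
  let lines := (PySem.Str.split? content "\n").getD []   -- sep "\n" ≠ "", so split? is always `some`
  (lines.foldl (stepA (fun line => PySem.Str.isIn marker line)) (false, [])).2

-- ===== PORT B =====
-- index of the first matching line, then the slice lines[i:]; [] if no line matches
def get_log_lines_after_alt (marker : String) (content : String) : List String :=
  let lines := (PySem.Str.split? content "\n").getD []   -- sep "\n" ≠ "", so split? is always `some`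
  match lines.findIdx? (fun line => PySem.Str.isIn marker line) with
  | some i => PySem.List.slice lines (some (i : Int)) none
  | none => []

-- ===== PRECONDITION & SPEC =====
def Spec_get_log_lines_after (marker : String) (content : String) (out : List String) : Prop := out = get_log_lines_after_alt marker content
instance (marker : String) (content : String) (out : List String) : Decidable (Spec_get_log_lines_after marker content out) := by unfold Spec_get_log_lines_after; infer_instance

-- ===== CLAIM (what is proved, stated in full; the proofs are below) =====
def Claim_equal_get_log_lines_after : Prop := ∀ (marker : String) (content : String), Dom_get_log_lines_after marker content → Spec_get_log_lines_after marker content (get_log_lines_after marker content)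

-- ===== LEMMAS AND PROOFS =====

-- once the flag is true, A's fold appends every remaining line
lemma foldA_true (p : String → Bool) (ls : List String) (acc : List String) :
    ls.foldl (stepA p) (true, acc) = (true, acc ++ ls) := by
  induction ls generalizing acc with
  | nil => simp
  | cons l t ih =>
    simp only [List.foldl_cons, stepA]
    by_cases h : p l = true <;> simp [h, ih]

-- with the flag false, A's fold yields acc ++ the tail from the first match
lemma foldA_false (p : String → Bool) (ls : List String) (acc : List String) :
    (ls.foldl (stepA p) (false, acc)).2
    = acc ++ (match ls.findIdx? p with
              | some i => ls.drop i
              | none => []) := by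
  induction ls generalizing acc with
  | nil => simp
  | cons l t ih =>
    simp only [List.foldl_cons, List.findIdx?_cons]
    by_cases h : p l = true
    · simp [stepA, h, foldA_true]
    · simp only [stepA, h, if_false, Bool.false_eq_true]
      rw [ih]
      cases ht : t.findIdx? p <;> simp

-- ===== VERDICT (by name: the statement is the Claim_ definition above) =====
theorem get_log_lines_after_spec : Claim_equal_get_log_lines_after := by
  intro marker content _
  unfold Spec_get_log_lines_after get_log_lines_after get_log_lines_after_alt
  simp only
  rw [foldA_false]
  cases h : ((PySem.Str.split? content "\n").getD []).findIdx? (fun line => PySem.Str.isIn marker line) with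
  | none => simp
  | some i => simp [PySem.List.slice_from_natCast]
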